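-- pv_equiv track=rewrite | github.com/DenBugNBA/YandexAlgorithmsTrainings | 3. Sets (1.0)/I_Polyglots.py | count_languages
-- ===== SOURCE A (Python) =====
-- def count_languages(pupils):
--     all_pupils = set(pupils[0])
--     all_languages = set(pupils[0])
--
--     for i in range(1, len(pupils)):
--         all_pupils &= set(pupils[i])
--         for language in pupils[i]:
--             all_languages.add(language)
--
--     return all_pupils, all_languages
-- ===== SOURCE B (Python) =====
-- def count_languages(pupils):
--     counts = {}
--     for pupil in pupils:
--         for language in dict.fromkeys(pupil):
--             counts[language] = counts.get(language, 0) + 1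
--     n = len(pupils)
--     all_pupils = {lang for lang, c in counts.items() if c == n}
--     all_languages = set(counts)
--     return all_pupils, all_languages
-- ===== Notes on version B (the rewrite author's own statement) =====
-- stated objective: alternative
-- what changed: B makes one counting pass building a dict of how many pupils know each language (deduplicating within each pupil) and then reads off all keys as all_languages and the keys counted len(pupils) times as all_pupils, instead of A's repeated set intersections and element-wise adds.
import Mathlib
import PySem

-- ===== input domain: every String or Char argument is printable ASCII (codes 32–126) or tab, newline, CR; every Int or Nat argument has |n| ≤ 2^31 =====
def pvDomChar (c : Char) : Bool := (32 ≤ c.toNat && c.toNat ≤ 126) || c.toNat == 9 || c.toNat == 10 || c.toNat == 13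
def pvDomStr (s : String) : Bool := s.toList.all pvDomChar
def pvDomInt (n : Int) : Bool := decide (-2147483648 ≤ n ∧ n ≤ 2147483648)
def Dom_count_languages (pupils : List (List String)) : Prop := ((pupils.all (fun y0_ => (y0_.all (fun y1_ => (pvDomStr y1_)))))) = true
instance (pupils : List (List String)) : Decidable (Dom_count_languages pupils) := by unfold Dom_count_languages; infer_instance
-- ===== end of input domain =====

-- B replaces A's running set-intersection and element-wise set adds with one counting
-- pass (a dict of per-pupil-distinct occurrence counts) read off at the end; same cost,
-- different decomposition. Pre_ excludes only the empty list, where A raises IndexError.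


-- ===== PORT A =====
-- A: all_pupils starts as set(pupils[0]) and is intersected with each later pupil's set;
-- all_languages starts as set(pupils[0]) and each later pupil's languages are added one by one.
def count_languages (pupils : List (List String)) : List String × List String :=
  match pupils with
  | [] => ([], [])   -- unreachable under Pre_: pupils[0] raises IndexError in Python
  | p0 :: rest =>
    -- for i in range(1, len(pupils)): the loop body reads pupils[i], i.e. runs over rest
    rest.foldl
      (fun (st : List String × List String) pi =>
        (PySem.Set.inter st.1 (PySem.Set.ofList pi),
         pi.foldl (fun s language => PySem.Set.add s language) st.2))
      (PySem.Set.ofList p0, PySem.Set.ofList p0)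

-- ===== PORT B =====
-- B: one counting pass; counts[language] = number of pupils knowing it (dedup per pupil),
-- then all_pupils = keys with count == len(pupils), all_languages = all keys.
def count_languages_alt (pupils : List (List String)) : List String × List String :=
  let counts : PySem.Dict String Int :=
    pupils.foldl
      (fun d pupil =>
        (PySem.List.dedup pupil).foldl
          (fun d language => d.insert language (d.getD language 0 + 1)) d)
      PySem.Dict.empty
  let n : Int := pupils.length
  let allPupils := (counts.items.filter (fun p => p.2 == n)).map (fun p => p.1)
  let allLanguages := counts.keys
  (allPupils, allLanguages)

-- ===== PRECONDITION & SPEC =====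
-- Pre_ excludes only the empty pupils list, on which A raises IndexError at pupils[0].
def Pre_count_languages (pupils : List (List String)) : Prop := pupils ≠ []
instance (pupils : List (List String)) : Decidable (Pre_count_languages pupils) := by unfold Pre_count_languages; infer_instance
def pvWitness_count_languages : List (List String) := [["ru", "en"], ["en"]]

def Spec_count_languages (pupils : List (List String)) (out : List String × List String) : Prop := out = count_languages_alt pupils
instance (pupils : List (List String)) (out : List String × List String) : Decidable (Spec_count_languages pupils out) := by unfold Spec_count_languages; infer_instance

-- ===== CLAIM (what is proved, stated in full; the proofs are below) =====
def Claim_equal_count_languages : Prop := ∀ (pupils : List (List String)), Dom_count_languages pupils → Pre_count_languages pupils → Spec_count_languages pupils (count_languages pupils)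

-- ===== LEMMAS AND PROOFS =====

-- B's nested counting loop is Counter(flatMap dedup pupils)
lemma counts_eq_counter (pupils : List (List String)) :
    pupils.foldl
      (fun d pupil =>
        (PySem.List.dedup pupil).foldl
          (fun d language => d.insert language (d.getD language 0 + 1)) d)
      PySem.Dict.empty
    = PySem.Dict.counter (pupils.flatMap PySem.List.dedup) := by
  rw [← PySem.Dict.foldl_insert_getD_add_one_eq_counter, List.foldl_flatMap]

-- the count of a language in the deduped flat list = the number of pupils knowing it
lemma count_flatMap_dedup (pupils : List (List String)) (v : String) :
    (pupils.flatMap PySem.List.dedup).count v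
      = pupils.countP (fun p => decide (v ∈ p)) := by
  induction pupils with
  | nil => simp
  | cons p t ih =>
    rw [List.flatMap_cons, List.count_append, ih, List.countP_cons,
      (PySem.List.nodup_dedup p).count]
    simp only [PySem.List.mem_dedup]
    split <;> simp_all
    omega

-- deduplicating a pupil before updating a set does not change the set
lemma update_dedup {s : PySem.Set String} (p : List String) :
    PySem.Set.update s (PySem.List.dedup p) = PySem.Set.update s p := by
  rw [PySem.Set.update_eq_append_filter, PySem.Set.update_eq_append_filter,
    PySem.List.dedup_eq_ofList, PySem.Set.ofList_ofList]

lemma update_flatMap_dedup (t : List (List String)) (s : PySem.Set String) :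
    PySem.Set.update s (t.flatMap PySem.List.dedup) = PySem.Set.update s t.flatten := by
  induction t generalizing s with
  | nil => rfl
  | cons q u ihq =>
    rw [List.flatMap_cons, List.flatten_cons, PySem.Set.update_append,
      PySem.Set.update_append, update_dedup, ihq]

lemma ofList_flatMap_dedup (pupils : List (List String)) :
    PySem.Set.ofList (pupils.flatMap PySem.List.dedup)
      = PySem.Set.ofList pupils.flatten :=
  update_flatMap_dedup pupils PySem.Set.empty

-- A's language loop: adding each element of each pupil is updating by the flattened rest
lemma langs_loop (rest : List (List String)) (s : PySem.Set String) :
    rest.foldl (fun s pi => pi.foldl (fun s l => PySem.Set.add s l) s) s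
      = PySem.Set.update s rest.flatten := by
  induction rest generalizing s with
  | nil => rfl
  | cons p t ih =>
    rw [List.foldl_cons, List.flatten_cons, PySem.Set.update_append, ih]
    rfl

-- A's intersection loop is one filter by membership in every later pupil
lemma inter_loop (rest : List (List String)) (s : PySem.Set String) :
    rest.foldl (fun s pi => PySem.Set.inter s (PySem.Set.ofList pi)) s
      = s.filter (fun x => rest.all (fun pi => pi.contains x)) := by
  induction rest generalizing s with
  | nil => simp
  | cons p t ih =>
    rw [List.foldl_cons, ih, PySem.Set.inter, List.filter_filter]
    refine List.filter_congr (fun x _ => ?_)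
    simp [PySem.Set.contains_eq_listContains, PySem.Set.mem_ofList,
      List.all_cons, Bool.and_comm]

lemma countP_rest_le (t : List (List String)) (x : String) :
    t.countP (fun p => decide (x ∈ p)) ≤ t.length := List.countP_le_length

-- ===== VERDICT (by name: the statement is the Claim_ definition above) =====
theorem count_languages_spec : Claim_equal_count_languages := by
  intro pupils _ hpre
  unfold Spec_count_languages
  cases pupils with
  | nil => exact absurd rfl hpre
  | cons p0 rest =>
    simp only [count_languages, count_languages_alt]
    rw [PySem.List.foldl_prod_mk
        (fun s pi => PySem.Set.inter s (PySem.Set.ofList pi))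
        (fun s pi => pi.foldl (fun s language => PySem.Set.add s language) s)
        rest (PySem.Set.ofList p0) (PySem.Set.ofList p0),
      counts_eq_counter, inter_loop, langs_loop]
    simp only [PySem.Dict.keys_counter, PySem.Dict.items_counter, List.filter_map,
      ofList_flatMap_dedup, List.flatten_cons, List.map_map]
    refine Prod.ext_iff.mpr ⟨?_, ?_⟩
    · -- all_pupils component
      simp only [Function.comp_def, List.map_id']
      rw [PySem.Set.ofList_append, PySem.Set.update_eq_append_filter, List.filter_append]
      have h2 : List.filter
            (fun k => ((List.count k ((p0 :: rest).flatMap PySem.List.dedup) : Nat) : Int) ==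
              ((p0 :: rest).length : Int))
            (List.filter (fun y => !(PySem.Set.ofList p0).contains y)
              (PySem.Set.ofList rest.flatten)) = [] := by
        rw [List.filter_eq_nil_iff]
        intro a ha
        have hnp0 : a ∉ p0 := by
          have := List.of_mem_filter ha
          simpa [PySem.Set.contains_eq_listContains, PySem.Set.mem_ofList] using this
        rw [count_flatMap_dedup, List.countP_cons]
        have hle := countP_rest_le rest a
        simp only [beq_iff_eq, List.length_cons, hnp0, decide_false]
        intro hc
        have : rest.countP (fun p => decide (a ∈ p)) = rest.length + 1 := by
          push_cast at hc; omega
        omega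
      rw [h2, List.append_nil]
      refine (List.filter_congr (fun x hx => ?_)).symm
      have hxp0 : x ∈ p0 := (PySem.Set.mem_ofList p0 x).mp hx
      rw [count_flatMap_dedup, List.countP_cons]
      have hle := countP_rest_le rest x
      simp only [hxp0, decide_true, if_true, List.length_cons]
      refine Bool.eq_iff_iff.mpr ?_
      simp only [beq_iff_eq, List.all_eq_true]
      constructor
      · intro h pi hpi
        have hcp : rest.countP (fun p => decide (x ∈ p)) = rest.length := by
          push_cast at h; omega
        have := List.countP_eq_length.mp hcp pi hpi
        simpa [List.elem_eq_contains] using this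
      · intro h
        have : rest.countP (fun p => decide (x ∈ p)) = rest.length :=
          List.countP_eq_length.mpr (fun a ha => by
            have := h a ha; simpa [List.elem_eq_contains] using this)
        push_cast
        omega
    · -- all_languages component
      rw [PySem.Set.ofList_append]
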